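-- pv_equiv track=rewrite | github.com/cucuwritescode/conformer-acr | mutate.py | inject_extension
-- ===== SOURCE A (Python) =====
-- from typing import Dict, List, Tuple, Optional
--
-- def get_outer_voices(pitches: List[int]) -> Tuple[int, int]:
--     """
--     Get the highest (melody) and lowest (bass) pitches from a chord.
--
--     Parameters
--     ----------
--     pitches : list of int
--         MIDI pitch values.
--
--     Returns
--     -------
--     tuple
--         (highest_pitch, lowest_pitch)
--     """
--     if not pitches:
--         return (0, 0)
--     return (max(pitches), min(pitches))
--
-- def inject_extension(pitches: List[int], extension_type: str = "13") -> List[int]: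
--     """
--     Inject 11th or 13th into a triad while preserving outer voices.
--
--     The extension is placed between bass and melody to preserve outer voices.
--
--     Parameters
--     ----------
--     pitches : list of int
--         Original triad pitches.
--     extension_type : str
--         "11" for 11th, "13" for 13th.
--
--     Returns
--     -------
--     list of int
--         Chord with extension added.
--     """
--     if len(pitches) < 3:
--         return pitches
--
--     pitches = pitches.copy()
--     root = min(pitches)
--     high, low = get_outer_voices(pitches)
--
--     #calculate extension interval from root
--     if extension_type == "11":
--         ext_interval = 5  # perfect 4th
--     else:  # "13"
--         ext_interval = 9  # major 6th
--
--     #find valid octave placement: must be strictly between outer voices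
--     ext_pitch = root + ext_interval
--
--     #adjust octave to fit between bass and melody
--     while ext_pitch <= low:
--         ext_pitch += 12
--     while ext_pitch >= high:
--         ext_pitch -= 12
--
--     #verify it's valid: strictly between outer voices and not duplicate
--     if low < ext_pitch < high and ext_pitch not in pitches:
--         pitches.append(ext_pitch)
--
--     return pitches
-- ===== SOURCE B (Python) =====
-- def inject_extension(pitches, extension_type="13"):
--     if len(pitches) < 3:
--         return pitches
--     out = list(pitches)
--     low = min(out)
--     high = max(out)
--     t = low + (5 if extension_type == "11" else 9)
--     if t >= high:
--         # largest value strictly below high congruent to t mod 12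
--         t = high - 1 - ((high - 1 - t) % 12)
--     if low < t < high and t not in out:
--         out.append(t)
--     return out
-- ===== Notes on version B (the rewrite author's own statement) =====
-- stated objective: simpler
-- what changed: Replaces the two octave-adjustment while loops with a single closed-form modular placement (the upward loop provably never fires since root==low, and the downward loop is `high-1-((high-1-t)%12)`).
import Mathlib
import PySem

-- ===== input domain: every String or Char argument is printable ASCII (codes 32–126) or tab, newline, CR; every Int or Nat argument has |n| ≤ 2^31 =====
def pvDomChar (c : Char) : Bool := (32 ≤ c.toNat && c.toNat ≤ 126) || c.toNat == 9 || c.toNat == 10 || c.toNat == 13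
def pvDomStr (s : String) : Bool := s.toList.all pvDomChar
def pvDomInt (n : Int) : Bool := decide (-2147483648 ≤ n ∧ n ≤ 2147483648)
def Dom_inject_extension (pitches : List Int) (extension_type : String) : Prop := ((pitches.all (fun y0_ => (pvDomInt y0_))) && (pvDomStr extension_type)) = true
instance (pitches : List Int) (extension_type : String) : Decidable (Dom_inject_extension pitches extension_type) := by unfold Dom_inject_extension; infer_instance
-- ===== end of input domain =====

-- B replaces A's two ±12 while loops by one closed-form modular placement; B is simpler, not faster.

-- ===== PORT A =====
-- helper: get_outer_voices(pitches) = (max, min), (0,0) on empty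
def pvGetOuterVoices (pitches : List Int) : Int × Int :=
  if pitches = [] then (0, 0)
  else ((PySem.List.max? pitches (fun x => x)).getD 0, (PySem.List.min? pitches (fun x => x)).getD 0)

-- while ext_pitch <= low: ext_pitch += 12
def pvLoopUp (low t : Int) : Int :=
  if t ≤ low then pvLoopUp low (t + 12) else t
termination_by (low + 12 - t).toNat
decreasing_by omega

-- while ext_pitch >= high: ext_pitch -= 12
def pvLoopDown (high t : Int) : Int :=
  if high ≤ t then pvLoopDown high (t - 12) else t
termination_by (t + 12 - high).toNat
decreasing_by omega

def inject_extension (pitches : List Int) (extension_type : String) : List Int :=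
  if pitches.length < 3 then pitches
  else
    let root := (PySem.List.min? pitches (fun x => x)).getD 0
    let hl := pvGetOuterVoices pitches
    let high := hl.1
    let low := hl.2
    let ext_interval : Int := if extension_type = "11" then 5 else 9
    let ext_pitch := pvLoopDown high (pvLoopUp low (root + ext_interval))
    if low < ext_pitch ∧ ext_pitch < high ∧ ¬ (ext_pitch ∈ pitches) then pitches ++ [ext_pitch]
    else pitches

-- ===== PORT B =====
def inject_extension_alt (pitches : List Int) (extension_type : String) : List Int :=
  if pitches.length < 3 then pitches
  else
    let low := (PySem.List.min? pitches (fun x => x)).getD 0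
    let high := (PySem.List.max? pitches (fun x => x)).getD 0
    let t0 := low + (if extension_type = "11" then (5 : Int) else 9)
    let t := if high ≤ t0 then high - 1 - PySem.Int.mod (high - 1 - t0) 12 else t0
    if low < t ∧ t < high ∧ ¬ (t ∈ pitches) then pitches ++ [t]
    else pitches

-- ===== PRECONDITION & SPEC =====
def Spec_inject_extension (pitches : List Int) (extension_type : String) (out : List Int) : Prop := out = inject_extension_alt pitches extension_type
instance (pitches : List Int) (extension_type : String) (out : List Int) : Decidable (Spec_inject_extension pitches extension_type out) := by unfold Spec_inject_extension; infer_instance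

-- ===== CLAIM (what is proved, stated in full; the proofs are below) =====
def Claim_equal_inject_extension : Prop := ∀ (pitches : List Int) (extension_type : String), Dom_inject_extension pitches extension_type → Spec_inject_extension pitches extension_type (inject_extension pitches extension_type)

-- ===== LEMMAS AND PROOFS =====

-- the upward loop exits immediately when t is already above low
theorem pvLoopUp_of_gt (low t : Int) (h : low < t) : pvLoopUp low t = t := by
  rw [pvLoopUp]
  simp [not_le.mpr h]

-- the downward loop is closed-form modular reduction
theorem pvLoopDown_eq (high t : Int) :
    pvLoopDown high t = if high ≤ t then high - 1 - (high - 1 - t) % 12 else t := by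
  fun_induction pvLoopDown high t with
  | case1 t h ih =>
    rw [ih, if_pos h]
    split
    · omega
    · omega
  | case2 t h =>
    rw [if_neg h]

-- ===== VERDICT (by name: the statement is the Claim_ definition above) =====
theorem inject_extension_spec : Claim_equal_inject_extension := by
  intro pitches extension_type _
  unfold Spec_inject_extension inject_extension inject_extension_alt pvGetOuterVoices
  by_cases hlen : pitches.length < 3
  · simp [hlen]
  · have hne : pitches ≠ [] := by
      intro h; subst h; simp at hlen
    simp only [if_neg hlen, if_neg hne]
    have hk : (0 : Int) < (if extension_type = "11" then (5 : Int) else 9) := by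
      split <;> omega
    rw [pvLoopUp_of_gt _ _ (by omega)]
    rw [pvLoopDown_eq]
    rw [PySem.Int.mod_eq_emod_of_pos (by omega)]
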